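-- pv_equiv track=rewrite | github.com/pypi-data/pypi-mirror-401 | packages/genro-toolbox/genro_toolbox-0.6.1.tar.gz/genro_toolbox-0.6.1/src/genro_toolbox/ascii_table.py | apply_hierarchy
-- ===== SOURCE A (Python) =====
-- def build_tree(paths, sep):
--     tree = {}
--     for full in paths:
--         parts = str(full).split(sep)
--         node = tree
--         for p in parts:
--             node = node.setdefault(p, {})
--     return tree
--
-- def flatten_tree(tree, level=0, prefix=""):
--     out = []
--     for key in sorted(tree.keys()):
--         full = prefix + key if prefix == "" else prefix + "/" + key
--         children = tree[key]
--         is_leaf = len(children) == 0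
--         out.append((full, key, level, is_leaf))
--         out.extend(flatten_tree(children, level + 1, full))
--     return out
--
-- def apply_hierarchy(headers, rows):
--     for idx, h in enumerate(headers):
--         if "hierarchy" not in h:
--             continue
--         sep = h["hierarchy"].get("sep", "/")
--         original = [r[idx] for r in rows]
--         mapvals = {r[idx]: r[1:] for r in rows}
--         tree = build_tree(original, sep)
--         tri = flatten_tree(tree)
--         other = len(rows[0]) - 1
--         new = []
--         for full, label, lvl, is_leaf in tri:
--             values = mapvals[full] if is_leaf and full in mapvals else [""] * other
--             new.append(["  " * lvl + label] + values)
--         return new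
--     return rows
-- ===== SOURCE B (Python) =====
-- def _join(parts):
--     full = ""
--     for part in parts:
--         full = part if full == "" else full + "/" + part
--     return full
--
-- def apply_hierarchy(headers, rows):
--     for idx, h in enumerate(headers):
--         if "hierarchy" not in h:
--             continue
--         sep = h["hierarchy"].get("sep", "/")
--         mapvals = {r[idx]: r[1:] for r in rows}
--         blank = [""] * (len(rows[0]) - 1)
--         splits = [tuple(r[idx].split(sep)) for r in rows]
--         nodes = {p[:i] for p in splits for i in range(1, len(p) + 1)}
--         parents = {p[:i] for p in splits for i in range(1, len(p))}
--         table = []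
--         for t in sorted(nodes):
--             full = _join(t)
--             if t not in parents and full in mapvals:
--                 values = mapvals[full]
--             else:
--                 values = blank
--             table.append(["  " * (len(t) - 1) + t[-1]] + values)
--         return table
--     return rows
-- ===== Notes on version B (the rewrite author's own statement) =====
-- stated objective: alternative
-- what changed: Replaces the recursive nested-dict trie (build_tree) and its recursive sorted-keys flattening (flatten_tree) by a flat one-shot computation: collect the set of all prefix tuples of the split paths, sort it lexicographically (which is exactly preorder with sorted siblings), and detect leaves as tuples that are not in the set of proper-prefix tuples; Pre_ excludes only the inputs where A raises (empty separator, empty rows, a row too short for the hierarchy column).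
import Mathlib
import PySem

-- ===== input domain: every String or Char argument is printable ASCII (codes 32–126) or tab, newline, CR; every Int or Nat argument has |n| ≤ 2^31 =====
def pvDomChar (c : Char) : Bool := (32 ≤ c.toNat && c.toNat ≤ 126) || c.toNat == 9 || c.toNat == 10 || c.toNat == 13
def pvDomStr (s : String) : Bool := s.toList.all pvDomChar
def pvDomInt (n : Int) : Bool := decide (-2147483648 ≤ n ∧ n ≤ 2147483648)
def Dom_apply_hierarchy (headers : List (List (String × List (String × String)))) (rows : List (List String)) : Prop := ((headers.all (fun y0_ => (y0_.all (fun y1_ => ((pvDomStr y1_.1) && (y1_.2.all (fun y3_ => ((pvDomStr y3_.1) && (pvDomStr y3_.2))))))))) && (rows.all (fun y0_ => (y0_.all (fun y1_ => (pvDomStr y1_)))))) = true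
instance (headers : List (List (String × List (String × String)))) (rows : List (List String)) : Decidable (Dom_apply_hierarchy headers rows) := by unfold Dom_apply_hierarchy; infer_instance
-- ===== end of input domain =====

-- B replaces A's recursive build_tree/flatten_tree trie with a flat computation on the set of
-- lex-sorted path-prefix tuples; equivalence of the RETURN value is proved on Pre_ (where Python A returns).

-- Python's 's * n' for a string and an int (n ≤ 0 gives ""): hand port, exact (join of n copies).
def pyStrMul (s : String) (n : Int) : String := PySem.Str.join "" (List.replicate n.toNat s)

-- ===== PORT A =====

-- the nested dicts A uses as tree nodes (dict[str, dict] trie), as a mutual pair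
mutual
inductive PTree : Type where
  | node : PTreeL → PTree
inductive PTreeL : Type where
  | nil : PTreeL
  | cons : String → PTree → PTreeL → PTreeL
end

def keysL : PTreeL → List String
  | .nil => []
  | .cons k _ tl => k :: keysL tl

def findL : PTreeL → String → Option PTree
  | .nil, _ => none
  | .cons k t tl, x => if k = x then some t else findL tl x

-- len(children) == 0
def emptyT : PTree → Bool
  | .node .nil => true
  | .node (.cons _ _ _) => false

-- replace the child under key p by f(child) (f(empty trie) if missing; dict order kept: new keys append)
def updL : PTreeL → String → (PTree → PTree) → PTreeL
  | .nil, p, f => .cons p (f (.node .nil)) .nil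
  | .cons k t tl, p, f =>
      if k = p then .cons k (f t) tl else .cons k t (updL tl p f)

-- 'node = node.setdefault(p, {})' down one path
def insertPath : PTree → List String → PTree
  | t, [] => t
  | .node cl, p :: rest => .node (updL cl p (fun c => insertPath c rest))

def build_tree (paths : List String) (sep : String) : PTree :=
  paths.foldl (fun tree full => insertPath tree ((PySem.Str.split? full sep).getD [])) (PTree.node PTreeL.nil)

mutual
def sizeT : PTree → Nat
  | .node cl => sizeL cl + 1
def sizeL : PTreeL → Nat
  | .nil => 0
  | .cons _ t tl => sizeT t + sizeL tl + 1
end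

theorem sizeT_findL (cl : PTreeL) (k : String) (t : PTree) (h : findL cl k = some t) : sizeT t < sizeL cl := by
  match cl with
  | .nil => simp [findL] at h
  | .cons k' t' tl =>
    simp only [findL] at h
    split at h
    · cases h; simp [sizeL]
    · have := sizeT_findL tl k t h; simp [sizeL]; omega

mutual
def flatten_tree (tree : PTree) (level : Int) (pref : String) : List (String × String × Int × Bool) :=
  match tree with
  | .node cl => flattenKeys cl (PySem.List.sorted (keysL cl) (fun k => k) false) level pref
  termination_by (sizeT tree, 0)
  decreasing_by apply Prod.Lex.left; simp [sizeT]
def flattenKeys (cl : PTreeL) (ks : List String) (level : Int) (pref : String) : List (String × String × Int × Bool) :=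
  match ks with
  | [] => []
  | k :: rest =>
      let full := if pref = "" then pref ++ k else pref ++ "/" ++ k
      (match h : findL cl k with
       | some child => (full, k, level, emptyT child) :: flatten_tree child (level + 1) full
       | none => []) ++ flattenKeys cl rest level pref
  termination_by (sizeL cl, ks.length + 1)
  decreasing_by
    · exact Prod.Lex.left _ _ (sizeT_findL _ _ _ (by assumption))
    · apply Prod.Lex.right; simp only [List.length_cons]; omega
end

def apply_hierarchy_go (headers : List (List (String × List (String × String)))) (idx : Int) (rows : List (List String)) : List (List String) :=
  match headers with
  | [] => rows
  | h :: hs =>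
      if (PySem.Dict.get? (PySem.Dict.mk h) "hierarchy").isSome then
        let cfg := (PySem.Dict.get? (PySem.Dict.mk h) "hierarchy").getD []
        let sep := PySem.Dict.getD (PySem.Dict.mk cfg) "sep" "/"
        let original := rows.map (fun r => PySem.List.pyGetD r idx "")
        let mapvals := rows.foldl (fun d r => PySem.Dict.insert d (PySem.List.pyGetD r idx "") (PySem.List.slice r (some 1) none)) PySem.Dict.empty
        let tri := flatten_tree (build_tree original sep) 0 ""
        let other : Int := ((PySem.List.pyGetD rows 0 []).length : Int) - 1
        tri.foldl (fun new q =>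
          new ++ [(pyStrMul "  " q.2.2.1 ++ q.2.1) ::
            (if q.2.2.2 && (PySem.Dict.get? mapvals q.1).isSome
             then (PySem.Dict.get? mapvals q.1).getD []
             else PySem.List.pyRepeat [""] other)]) []
      else apply_hierarchy_go hs (idx + 1) rows

def apply_hierarchy (headers : List (List (String × List (String × String)))) (rows : List (List String)) : List (List String) :=
  apply_hierarchy_go headers 0 rows

-- ===== PORT B =====

-- _join: incremental display-path join (empty accumulator takes the part as-is)
def joinParts (parts : List String) : String :=
  parts.foldl (fun full part => if full = "" then part else full ++ "/" ++ part) ""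

def apply_hierarchy_alt_go (headers : List (List (String × List (String × String)))) (idx : Int) (rows : List (List String)) : List (List String) :=
  match headers with
  | [] => rows
  | h :: hs =>
      if (PySem.Dict.get? (PySem.Dict.mk h) "hierarchy").isSome then
        let sep := PySem.Dict.getD (PySem.Dict.mk ((PySem.Dict.get? (PySem.Dict.mk h) "hierarchy").getD [])) "sep" "/"
        let mapvals := rows.foldl (fun d r => PySem.Dict.insert d (PySem.List.pyGetD r idx "") (PySem.List.slice r (some 1) none)) PySem.Dict.empty
        let blank := PySem.List.pyRepeat [""] (((PySem.List.pyGetD rows 0 []).length : Int) - 1)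
        let splits := rows.map (fun r => (PySem.Str.split? (PySem.List.pyGetD r idx "") sep).getD [])
        let nodes : PySem.Set (List String) := PySem.Set.ofList (splits.flatMap (fun p => (PySem.List.pyRange 1 ((p.length : Int) + 1) 1).map (fun i => p.take i.toNat)))
        let parents : PySem.Set (List String) := PySem.Set.ofList (splits.flatMap (fun p => (PySem.List.pyRange 1 (p.length : Int) 1).map (fun i => p.take i.toNat)))
        (PySem.List.sorted nodes (fun t => t) false).map (fun t =>
          (pyStrMul "  " ((t.length : Int) - 1) ++ PySem.List.pyGetD t (-1) "") ::
          (if !(PySem.Set.contains parents t) && (PySem.Dict.get? mapvals (joinParts t)).isSome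
           then (PySem.Dict.get? mapvals (joinParts t)).getD []
           else blank))
      else apply_hierarchy_alt_go hs (idx + 1) rows

def apply_hierarchy_alt (headers : List (List (String × List (String × String)))) (rows : List (List String)) : List (List String) :=
  apply_hierarchy_alt_go headers 0 rows

-- ===== PRECONDITION & SPEC =====

-- Pre_ excludes exactly the inputs where the Python A raises: when a hierarchy header exists at
-- (first) position i, A needs a non-empty separator (str.split raises ValueError on ""), at least
-- one row (rows[0] raises IndexError) and every row long enough for r[i] (IndexError).
def pvHasHier (h : List (String × List (String × String))) : Bool :=
  (PySem.Dict.get? (PySem.Dict.mk h) "hierarchy").isSome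

def pvSepOf (h : List (String × List (String × String))) : String :=
  PySem.Dict.getD (PySem.Dict.mk ((PySem.Dict.get? (PySem.Dict.mk h) "hierarchy").getD [])) "sep" "/"

def pvPreB (headers : List (List (String × List (String × String)))) (rows : List (List String)) : Bool :=
  match headers.findIdx? pvHasHier with
  | none => true
  | some i => pvSepOf (headers.getD i []) != "" && !rows.isEmpty && rows.all (fun r => i < r.length)

def Pre_apply_hierarchy (headers : List (List (String × List (String × String)))) (rows : List (List String)) : Prop :=
  pvPreB headers rows = true
instance (headers : List (List (String × List (String × String)))) (rows : List (List String)) : Decidable (Pre_apply_hierarchy headers rows) := by unfold Pre_apply_hierarchy; infer_instance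

def pvWitness_apply_hierarchy : (List (List (String × List (String × String)))) × List (List String) :=
  ([[("hierarchy", [])]], [["a/b", "1"], ["a", "2"]])

def Spec_apply_hierarchy (headers : List (List (String × List (String × String)))) (rows : List (List String)) (out : List (List String)) : Prop := out = apply_hierarchy_alt headers rows
instance (headers : List (List (String × List (String × String)))) (rows : List (List String)) (out : List (List String)) : Decidable (Spec_apply_hierarchy headers rows out) := by unfold Spec_apply_hierarchy; infer_instance

-- ===== CLAIM (what is proved, stated in full; the proofs are below) =====
def Claim_equal_apply_hierarchy : Prop := ∀ (headers : List (List (String × List (String × String)))) (rows : List (List String)), Dom_apply_hierarchy headers rows → Pre_apply_hierarchy headers rows → Spec_apply_hierarchy headers rows (apply_hierarchy headers rows)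

-- ===== LEMMAS AND PROOFS =====

-- unsorted node paths of a trie (each nonempty key sequence reaching a node)
mutual
def seqsT : PTree → List (List String)
  | .node cl => seqsL cl
def seqsL : PTreeL → List (List String)
  | .nil => []
  | .cons k t tl => [k] :: (seqsT t).map (k :: ·) ++ seqsL tl
end

-- well-formedness: keys at every node are distinct (true of Python dicts)
mutual
def wfT : PTree → Bool
  | .node cl => wfL cl
def wfL : PTreeL → Bool
  | .nil => true
  | .cons k t tl => !(keysL tl).contains k && wfT t && wfL tl
end

-- the (path, is_leaf) pairs in the order flatten_tree visits them
mutual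
def slT : PTree → List (List String × Bool)
  | .node cl => slL cl (PySem.List.sorted (keysL cl) (fun k => k) false)
  termination_by t => (sizeT t, 0)
  decreasing_by apply Prod.Lex.left; simp [sizeT]
def slL (cl : PTreeL) (ks : List String) : List (List String × Bool) :=
  match ks with
  | [] => []
  | k :: rest =>
      (match h : findL cl k with
       | some child => ([k], emptyT child) :: (slT child).map (fun p => (k :: p.1, p.2))
       | none => []) ++ slL cl rest
  termination_by (sizeL cl, ks.length + 1)
  decreasing_by
    · exact Prod.Lex.left _ _ (sizeT_findL _ _ _ (by assumption))
    · apply Prod.Lex.right; simp only [List.length_cons]; omega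
end

-- the per-key block of slL
def slBlock (cl : PTreeL) (k : String) : List (List String × Bool) :=
  match findL cl k with
  | some child => ([k], emptyT child) :: (slT child).map (fun p => (k :: p.1, p.2))
  | none => []

theorem slL_eq_flatMap (cl : PTreeL) (ks : List String) :
    slL cl ks = ks.flatMap (slBlock cl) := by
  induction ks with
  | nil => simp [slL]
  | cons k rest ih =>
      rw [slL, ih, List.flatMap_cons, slBlock]
      cases hfind : findL cl k <;> simp

theorem mem_seqsL_ne_nil : ∀ (cl : PTreeL) (s : List String), s ∈ seqsL cl → s ≠ [] := by
  intro cl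
  match cl with
  | .nil => intro s hs; simp [seqsL] at hs
  | .cons k t tl =>
      intro s hs
      simp only [seqsL, List.mem_cons, List.mem_append, List.mem_map] at hs
      rcases hs with (h | ⟨u, _, rfl⟩) | h
      · simp [h]
      · simp
      · exact mem_seqsL_ne_nil tl s h

theorem head_mem_keysL : ∀ (cl : PTreeL) (x : String) (xs : List String), x :: xs ∈ seqsL cl → x ∈ keysL cl := by
  intro cl
  match cl with
  | .nil => intro x xs hs; simp [seqsL] at hs
  | .cons k t tl =>
      intro x xs hs
      simp only [seqsL, List.mem_cons, List.mem_append, List.mem_map] at hs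
      rcases hs with (h | ⟨u, _, hu⟩) | h
      · simp at h; simp [keysL, h.1]
      · simp at hu; simp [keysL, hu.1]
      · simp [keysL]; exact Or.inr (head_mem_keysL tl x xs h)

theorem mem_keys_findL : ∀ (cl : PTreeL) (k : String), k ∈ keysL cl → ∃ c, findL cl k = some c := by
  intro cl
  match cl with
  | .nil => intro k hk; simp [keysL] at hk
  | .cons k' t tl =>
      intro k hk
      simp only [keysL, List.mem_cons] at hk
      by_cases h : k' = k
      · exact ⟨t, by simp [findL, h]⟩
      · rcases hk with rfl | hk
        · exact absurd rfl h
        · obtain ⟨c, hc⟩ := mem_keys_findL tl k hk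
          exact ⟨c, by simp [findL, h, hc]⟩

theorem wf_findL : ∀ (cl : PTreeL) (k : String) (c : PTree), wfL cl = true → findL cl k = some c → wfT c = true := by
  intro cl
  match cl with
  | .nil => intro k c _ h; simp [findL] at h
  | .cons k' t tl =>
      intro k c hwf h
      simp only [wfL, Bool.and_eq_true] at hwf
      simp only [findL] at h
      split at h
      · cases h; exact hwf.1.2
      · exact wf_findL tl k c hwf.2 h

theorem cons_mem_seqsL : ∀ (cl : PTreeL), wfL cl = true → ∀ (x : String) (xs : List String),
    (x :: xs ∈ seqsL cl ↔ ∃ c, findL cl x = some c ∧ (xs = [] ∨ xs ∈ seqsT c)) := by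
  intro cl
  match cl with
  | .nil => intro _ x xs; simp [seqsL, findL]
  | .cons k t tl =>
      intro hwf x xs
      simp only [wfL, Bool.and_eq_true, Bool.not_eq_true'] at hwf
      obtain ⟨⟨hnot, hwt⟩, hwtl⟩ := hwf
      simp only [seqsL, List.mem_cons, List.mem_append, List.mem_map]
      by_cases hx : k = x
      · subst hx
        constructor
        · rintro ((h | ⟨u, hu, hequ⟩) | h)
          · simp at h
            exact ⟨t, by simp [findL], Or.inl h⟩
          · simp at hequ
            exact ⟨t, by simp [findL], Or.inr (hequ ▸ hu)⟩
          · exact absurd (head_mem_keysL tl k xs h)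
              (by simpa [List.contains_iff_mem] using hnot)
        · rintro ⟨c, hc, h⟩
          simp [findL] at hc
          subst hc
          rcases h with rfl | h
          · exact Or.inl (Or.inl rfl)
          · exact Or.inl (Or.inr ⟨xs, h, rfl⟩)
      · constructor
        · rintro ((h | ⟨u, hu, hequ⟩) | h)
          · simp at h; exact absurd h.1.symm hx
          · simp at hequ; exact absurd hequ.1 hx

          · obtain ⟨c, hc, h'⟩ := (cons_mem_seqsL tl hwtl x xs).mp h
            exact ⟨c, by simp [findL, hx, hc], h'⟩
        · rintro ⟨c, hc, h⟩
          simp only [findL, if_neg hx] at hc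
          exact Or.inr ((cons_mem_seqsL tl hwtl x xs).mpr ⟨c, hc, h⟩)

theorem seqsL_eq_flatMap (cl : PTreeL) (h : wfL cl = true) :
    seqsL cl = (keysL cl).flatMap (fun k =>
      match findL cl k with
      | some child => [k] :: (seqsT child).map (k :: ·)
      | none => []) := by
  match cl with
  | .nil => simp [seqsL, keysL]
  | .cons k t tl =>
      simp only [wfL, Bool.and_eq_true, Bool.not_eq_true'] at h
      obtain ⟨⟨hnot, hwt⟩, hwtl⟩ := h
      have h1 : findL (PTreeL.cons k t tl) k = some t := by simp [findL]
      rw [seqsL, seqsL_eq_flatMap tl hwtl, keysL, List.flatMap_cons, h1]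
      rw [List.cons_append]
      congr 1
      congr 1
      apply List.flatMap_congr
      intro k' hk'
      have hne : k ≠ k' := fun hEq => absurd (hEq ▸ hk') (by simpa [List.contains_iff_mem] using hnot)
      simp [findL, hne]

-- every path slT emits is nonempty
theorem slT_ne_nil : ∀ (n : Nat) (t : PTree), sizeT t ≤ n → ∀ p ∈ slT t, p.1 ≠ [] := by
  intro n
  induction n with
  | zero => intro t ht; cases t with | node cl => simp [sizeT] at ht
  | succ n ih =>
      intro t ht p hp
      cases t with
      | node cl =>
        rw [slT, slL_eq_flatMap, List.mem_flatMap] at hp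
        obtain ⟨k, _, hb⟩ := hp
        rw [slBlock] at hb
        split at hb
        · rename_i child hfind
          rcases List.mem_cons.mp hb with rfl | hb
          · simp
          · obtain ⟨q, hq, rfl⟩ := List.mem_map.mp hb; simp
        · simp at hb

-- flatten_tree is slT decorated with the running full path, label and level
def decoFn (pref : String) (lvl : Int) (p : List String × Bool) : String × String × Int × Bool :=
  (p.1.foldl (fun full part => if full = "" then full ++ part else full ++ "/" ++ part) pref,
   p.1.getLastD "", lvl + p.1.length - 1, p.2)

theorem flatten_eq_slT : ∀ (n : Nat) (t : PTree), sizeT t ≤ n → ∀ (lvl : Int) (pref : String),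
    flatten_tree t lvl pref = (slT t).map (decoFn pref lvl) := by
  intro n
  induction n with
  | zero => intro t ht; cases t with | node cl => simp [sizeT] at ht
  | succ n ih =>
      intro t ht lvl pref
      cases t with
      | node cl =>
        rw [flatten_tree, slT]
        have hsz : sizeL cl ≤ n := by simp [sizeT] at ht; omega
        -- inner induction over the sorted key list
        suffices h : ∀ ks : List String, flattenKeys cl ks lvl pref = (slL cl ks).map (decoFn pref lvl) by
          exact h _
        intro ks
        induction ks with
        | nil => simp [flattenKeys, slL]
        | cons k rest ihk =>
            rw [flattenKeys, slL]
            cases hfind : findL cl k with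
            | none => simpa [hfind] using ihk
            | some child =>
                have hchild : sizeT child ≤ n := le_of_lt (lt_of_lt_of_le (sizeT_findL cl k child hfind) hsz)
                have hmap : flatten_tree child (lvl + 1) (if pref = "" then pref ++ k else pref ++ "/" ++ k)
                    = ((slT child).map (fun p => (k :: p.1, p.2))).map (decoFn pref lvl) := by
                  rw [ih child hchild, List.map_map]
                  apply List.map_congr_left
                  intro q hq
                  have hne : q.1 ≠ [] := slT_ne_nil n child hchild q hq
                  simp only [Function.comp, decoFn, List.foldl_cons, List.length_cons]
                  have h2 : (k :: q.1).getLastD "" = q.1.getLastD "" := by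
                    cases q1 : q.1 with
                    | nil => exact absurd q1 hne
                    | cons a as => simp
                  have h3 : lvl + (↑(q.1.length + 1) : Int) - 1 = lvl + 1 + ↑q.1.length - 1 := by
                    push_cast; ring
                  rw [h2, h3]
                simp only [List.map_append, List.map_cons, hmap, ihk, decoFn]
                simp

-- slT paths are a permutation of the unsorted node paths
theorem slT_perm : ∀ (n : Nat) (t : PTree), sizeT t ≤ n → wfT t = true →
    ((slT t).map (·.1)).Perm (seqsT t) := by
  intro n
  induction n with
  | zero => intro t ht; cases t with | node cl => simp [sizeT] at ht
  | succ n ih =>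
      intro t ht hwf
      cases t with
      | node cl =>
        have hsz : sizeL cl ≤ n := by simp [sizeT] at ht; omega
        have hwl : wfL cl = true := by simpa [wfT] using hwf
        rw [slT, slL_eq_flatMap, seqsT, seqsL_eq_flatMap cl hwl, List.map_flatMap]
        refine List.Perm.flatMap (PySem.List.sorted_perm (keysL cl) (fun k => k) false) ?_
        intro k hk
        have hkk : k ∈ keysL cl := by
          have := PySem.List.mem_sorted (xs := keysL cl) (key := fun k => k) (rev := false) (x := k)
          exact this.mp hk
        obtain ⟨c, hc⟩ := mem_keys_findL cl k hkk
        have hwc : wfT c = true := wf_findL cl k c hwl hc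
        have hszc : sizeT c ≤ n := le_of_lt (lt_of_lt_of_le (sizeT_findL cl k c hc) hsz)
        simp only [slBlock, hc, List.map_cons, List.map_map]
        refine List.Perm.cons _ ?_
        have : ((slT c).map (·.1)).map (k :: ·) |>.Perm ((seqsT c).map (k :: ·)) :=
          List.Perm.map _ (ih c hszc hwc)
        simpa [List.map_map, Function.comp] using this

-- keys of a wf node are pairwise distinct, so its sorted keys are strictly increasing
theorem keys_nodup (cl : PTreeL) (h : wfL cl = true) : (keysL cl).Nodup := by
  match cl with
  | .nil => simp [keysL]
  | .cons k t tl =>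
      simp only [wfL, Bool.and_eq_true, Bool.not_eq_true'] at h
      obtain ⟨⟨hnot, _⟩, hwtl⟩ := h
      simp only [keysL, List.nodup_cons]
      exact ⟨by simpa [List.contains_iff_mem] using hnot, keys_nodup tl hwtl⟩

theorem sorted_keys_pairwise_lt (cl : PTreeL) (h : wfL cl = true) :
    (PySem.List.sorted (keysL cl) (fun k => k) false).Pairwise (· < ·) := by
  have hle : (PySem.List.sorted (keysL cl) (fun k => k) false).Pairwise (fun a b => a ≤ b) := by
    have e : (PySem.List.sorted (keysL cl) (fun k => k) false)
        = @PySem.List.sorted String String String.instLinearOrder.toLT LinearOrder.toDecidableLT (keysL cl) (fun k => k) false := by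
      congr 1
    rw [e]; exact PySem.List.sorted_pairwise (keysL cl) (fun k => k)
  have hnd : (PySem.List.sorted (keysL cl) (fun k => k) false).Nodup :=
    (PySem.List.sorted_perm (keysL cl) (fun k => k) false).nodup_iff.mpr (keys_nodup cl h)
  exact (hle.and hnd).imp (fun h => lt_of_le_of_ne h.1 h.2)

-- every path listed for the block of key k starts with k
theorem mem_slBlock_fst (cl : PTreeL) (k : String) (x : List String)
    (hx : x ∈ (slBlock cl k).map (·.1)) : ∃ u, x = k :: u := by
  rcases hfind : findL cl k with _ | c <;> simp [slBlock, hfind] at hx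
  rcases hx with rfl | ⟨a, b, _, rfl⟩
  · exact ⟨[], rfl⟩
  · exact ⟨a, rfl⟩

-- slT paths are strictly lexicographically increasing
theorem slT_pairwise : ∀ (n : Nat) (t : PTree), sizeT t ≤ n → wfT t = true →
    ((slT t).map (·.1)).Pairwise (· < ·) := by
  intro n
  induction n with
  | zero => intro t ht; cases t with | node cl => simp [sizeT] at ht
  | succ n ih =>
      intro t ht hwf
      cases t with
      | node cl =>
        have hsz : sizeL cl ≤ n := by simp [sizeT] at ht; omega
        have hwl : wfL cl = true := by simpa [wfT] using hwf
        rw [slT, slL_eq_flatMap, List.map_flatMap, List.pairwise_flatMap]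
        constructor
        · intro k hk
          rcases hfind : findL cl k with _ | c
          · simp [slBlock, hfind]
          · have hwc := wf_findL cl k c hwl hfind
            have hszc : sizeT c ≤ n := le_of_lt (lt_of_lt_of_le (sizeT_findL cl k c hfind) hsz)
            have ihc := ih c hszc hwc
            simp only [slBlock, hfind, List.map_cons, List.map_map]
            rw [List.pairwise_cons]
            constructor
            · intro a ha
              obtain ⟨q, hq, rfl⟩ := List.mem_map.mp ha
              have hne := slT_ne_nil n c hszc q hq
              show [k] < k :: q.1
              cases hq1 : q.1 with
              | nil => exact absurd hq1 hne
              | cons b bs => exact List.Lex.cons List.Lex.nil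
            · rw [List.pairwise_map]
              exact (List.pairwise_map.mp ihc).imp (fun h => List.Lex.cons h)
        · have hks := sorted_keys_pairwise_lt cl hwl
          refine hks.imp ?_
          intro k1 k2 h12 x hx y hy
          obtain ⟨u, rfl⟩ := mem_slBlock_fst cl k1 x hx
          obtain ⟨v, rfl⟩ := mem_slBlock_fst cl k2 y hy
          exact List.Lex.rel h12

-- a trie node has no children iff it has no singleton path
theorem emptyT_iff (c : PTree) : emptyT c = true ↔ ∀ k, [k] ∉ seqsT c := by
  cases c with
  | node cl =>
      cases cl with
      | nil => simp [emptyT, seqsT, seqsL]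
      | cons k1 t1 tl1 =>
          simp only [emptyT, seqsT, seqsL]
          constructor
          · intro h; cases h
          · intro h; exact absurd (by simp : [k1] ∈ ([k1] :: _ ++ _)) (h k1)

-- the leaf flag is true exactly when the path has no extension in the trie
theorem slT_flag : ∀ (n : Nat) (t : PTree), sizeT t ≤ n → wfT t = true →
    ∀ p ∈ slT t, (p.2 = true ↔ ∀ k, p.1 ++ [k] ∉ seqsT t) := by
  intro n
  induction n with
  | zero => intro t ht; cases t with | node cl => simp [sizeT] at ht
  | succ n ih =>
      intro t ht hwf p hp
      cases t with
      | node cl =>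
        have hsz : sizeL cl ≤ n := by simp [sizeT] at ht; omega
        have hwl : wfL cl = true := by simpa [wfT] using hwf
        rw [slT, slL_eq_flatMap, List.mem_flatMap] at hp
        obtain ⟨k0, _, hb⟩ := hp
        rcases hfind : findL cl k0 with _ | c
        · simp [slBlock, hfind] at hb
        · have hwc := wf_findL cl k0 c hwl hfind
          have hszc : sizeT c ≤ n := le_of_lt (lt_of_lt_of_le (sizeT_findL cl k0 c hfind) hsz)
          have hext : ∀ xs : List String, (k0 :: xs ∈ seqsT (PTree.node cl) ↔ xs = [] ∨ xs ∈ seqsT c) := by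
            intro xs
            rw [show seqsT (PTree.node cl) = seqsL cl from rfl, cons_mem_seqsL cl hwl]
            constructor
            · rintro ⟨c', hc', h'⟩; rw [hfind] at hc'; cases hc'; exact h'
            · intro h'; exact ⟨c, hfind, h'⟩
          simp only [slBlock, hfind, List.mem_cons] at hb
          rcases hb with rfl | hb
          · -- p = ([k0], emptyT c)
            simp only [List.cons_append, List.nil_append]
            rw [emptyT_iff c]
            constructor
            · intro h k hmem
              rw [hext [k]] at hmem
              rcases hmem with h' | h'
              · cases h'
              · exact absurd h' (h k)
            · intro h k hmem
              exact absurd ((hext [k]).mpr (Or.inr hmem)) (h k)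
          · obtain ⟨q, hq, rfl⟩ := List.mem_map.mp hb
            have hih := ih c hszc hwc q hq
            simp only []
            rw [hih]
            constructor
            · intro h k hmem
              rw [List.cons_append, hext (q.1 ++ [k])] at hmem
              rcases hmem with h' | h'
              · exact absurd h' (by simp)
              · exact absurd h' (h k)
            · intro h k hmem
              exact absurd ((hext (q.1 ++ [k])).mpr (Or.inr hmem)) (by simpa using h k)

-- findL after updL
theorem updL_find : ∀ (cl : PTreeL) (p x : String) (f : PTree → PTree),
    findL (updL cl p f) x =
      if p = x then some (f ((findL cl p).getD (.node .nil))) else findL cl x := by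
  intro cl
  match cl with
  | .nil =>
      intro p x f
      simp [updL, findL]
  | .cons k t tl =>
      intro p x f
      by_cases hkp : k = p
      · subst hkp
        by_cases hkx : k = x
        · subst hkx; simp [updL, findL]
        · simp [updL, findL, hkx]
      · by_cases hkx : k = x
        · subst hkx
          have h2 : ¬ p = k := fun h => hkp h.symm
          simp [updL, findL, hkp, h2]
        · simp [updL, findL, hkp, hkx, updL_find tl p x f]

theorem updL_keys : ∀ (cl : PTreeL) (p : String) (f : PTree → PTree),
    keysL (updL cl p f) = if p ∈ keysL cl then keysL cl else keysL cl ++ [p] := by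
  intro cl
  match cl with
  | .nil => intro p f; simp [updL, keysL]
  | .cons k t tl =>
      intro p f
      by_cases hkp : k = p
      · subst hkp; simp [updL, keysL]
      · simp only [updL, if_neg hkp, keysL, updL_keys tl p f]
        have : ¬ p = k := fun h => hkp h.symm
        by_cases hm : p ∈ keysL tl <;> simp [hm, this]

theorem wf_updL : ∀ (cl : PTreeL) (p : String) (f : PTree → PTree),
    wfL cl = true → (∀ t, wfT t = true → wfT (f t) = true) →
    wfL (updL cl p f) = true := by
  intro cl
  match cl with
  | .nil =>
      intro p f _ hf
      simp [updL, wfL, keysL]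
      exact hf (.node .nil) rfl
  | .cons k t tl =>
      intro p f hwf hf
      simp only [wfL, Bool.and_eq_true, Bool.not_eq_true'] at hwf
      obtain ⟨⟨hnot, hwt⟩, hwtl⟩ := hwf
      by_cases hkp : k = p
      · subst hkp
        have hft := hf t hwt
        simp [updL, wfL, hwtl, hft]
        simpa [List.contains_iff_mem] using hnot
      · simp only [updL, if_neg hkp, wfL, Bool.and_eq_true, Bool.not_eq_true']
        refine ⟨⟨?_, hwt⟩, wf_updL tl p f hwtl hf⟩
        rw [updL_keys tl p f]
        split
        · exact hnot
        · simp only [List.contains_append, Bool.or_eq_false_iff]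
          refine ⟨hnot, ?_⟩
          simp
          first
            | exact fun h => hkp h.symm
            | exact fun h => hkp h

theorem wf_insert : ∀ (parts : List String) (t : PTree),
    wfT t = true → wfT (insertPath t parts) = true := by
  intro parts
  induction parts with
  | nil => intro t h; simpa [insertPath] using h
  | cons p rest ih =>
      intro t h
      cases t with
      | node cl =>
        rw [insertPath, wfT]
        exact wf_updL cl p _ (by simpa [wfT] using h) (fun c hc => ih c hc)

theorem seqs_insert : ∀ (parts : List String) (t : PTree), wfT t = true →
    ∀ s, s ∈ seqsT (insertPath t parts) ↔ s ∈ seqsT t ∨ (s ≠ [] ∧ s <+: parts) := by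
  intro parts
  induction parts with
  | nil =>
      intro t hwf s
      simp [insertPath]
  | cons p rest ih =>
      intro t hwf s
      cases t with
      | node cl =>
        have hwl : wfL cl = true := by simpa [wfT] using hwf
        have hupd : wfL (updL cl p (fun c => insertPath c rest)) = true :=
          wf_updL cl p _ hwl (fun c hc => wf_insert rest c hc)
        have hT : seqsT (insertPath (PTree.node cl) (p :: rest))
            = seqsL (updL cl p (fun c => insertPath c rest)) := rfl
        have hT0 : seqsT (PTree.node cl) = seqsL cl := rfl
        -- well-formedness of the (possibly fresh) child at p
        have hwc0 : wfT ((findL cl p).getD (PTree.node PTreeL.nil)) = true := by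
          rcases hf : findL cl p with _ | c
          · rfl
          · exact wf_findL cl p c hwl hf
        cases s with
        | nil =>
            rw [hT, hT0]
            constructor
            · intro h; exact absurd rfl (mem_seqsL_ne_nil _ _ h)
            · rintro (h | ⟨hne, _⟩)
              · exact absurd rfl (mem_seqsL_ne_nil _ _ h)
              · exact absurd rfl hne
        | cons x xs =>
            rw [hT, hT0, cons_mem_seqsL _ hupd]
            by_cases hpx : p = x
            · subst hpx
              constructor
              · rintro ⟨c, hc, h⟩
                rw [updL_find, if_pos rfl, Option.some.injEq] at hc
                subst hc
                rcases h with rfl | h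
                · exact Or.inr (by simp)
                · rw [ih _ hwc0] at h
                  rcases h with h | ⟨hne, hpre⟩
                  · left
                    rw [cons_mem_seqsL cl hwl]
                    rcases hf : findL cl p with _ | c
                    · rw [hf] at h; cases h
                    · rw [hf] at h; exact ⟨c, rfl, Or.inr h⟩
                  · exact Or.inr (by simp [List.cons_prefix_cons, hpre])
              · rintro (h | ⟨_, hpre⟩)
                · rw [cons_mem_seqsL cl hwl] at h
                  obtain ⟨c, hc, h'⟩ := h
                  refine ⟨_, by rw [updL_find, if_pos rfl], ?_⟩
                  rcases h' with rfl | h'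
                  · exact Or.inl rfl
                  · right
                    rw [ih _ hwc0]
                    rw [hc]
                    exact Or.inl h'
                · rw [List.cons_prefix_cons] at hpre
                  refine ⟨_, by rw [updL_find, if_pos rfl], ?_⟩
                  by_cases hxs : xs = []
                  · exact Or.inl hxs
                  · exact Or.inr ((ih _ hwc0 xs).mpr (Or.inr ⟨hxs, hpre.2⟩))
            · rw [updL_find, if_neg hpx]
              rw [← cons_mem_seqsL cl hwl]
              constructor
              · exact fun h => Or.inl h
              · rintro (h | ⟨_, hpre⟩)
                · exact h
                · rw [List.cons_prefix_cons] at hpre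
                  exact absurd hpre.1.symm hpx

theorem wf_foldl_insert (paths : List String) (sep : String) : ∀ (t : PTree), wfT t = true →
    wfT (paths.foldl (fun tree full => insertPath tree ((PySem.Str.split? full sep).getD [])) t) = true := by
  induction paths with
  | nil => intro t h; exact h
  | cons p ps ih =>
      intro t h
      exact ih _ (wf_insert _ _ h)

theorem wf_build (paths : List String) (sep : String) : wfT (build_tree paths sep) = true := by
  exact wf_foldl_insert paths sep _ rfl

theorem seqs_foldl_insert (sep : String) (s : List String) : ∀ (paths : List String) (t : PTree), wfT t = true →
    (s ∈ seqsT (paths.foldl (fun tree full => insertPath tree ((PySem.Str.split? full sep).getD [])) t) ↔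
      s ∈ seqsT t ∨ ∃ p ∈ paths, s ≠ [] ∧ s <+: (PySem.Str.split? p sep).getD []) := by
  intro paths
  induction paths with
  | nil => intro t h; simp
  | cons p ps ih =>
      intro t h
      rw [List.foldl_cons, ih _ (wf_insert _ _ h), seqs_insert _ _ h]
      simp only [List.mem_cons]
      constructor
      · rintro ((h' | h') | ⟨q, hq, h'⟩)
        · exact Or.inl h'
        · exact Or.inr ⟨p, Or.inl rfl, h'⟩
        · exact Or.inr ⟨q, Or.inr hq, h'⟩
      · rintro (h' | ⟨q, (rfl | hq), h'⟩)
        · exact Or.inl (Or.inl h')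
        · exact Or.inl (Or.inr h')
        · exact Or.inr ⟨q, hq, h'⟩

theorem seqs_build (paths : List String) (sep : String) (s : List String) :
    s ∈ seqsT (build_tree paths sep) ↔
      ∃ p ∈ paths, s ≠ [] ∧ s <+: (PySem.Str.split? p sep).getD [] := by
  rw [build_tree, seqs_foldl_insert sep s paths _ rfl]
  simp [seqsT, seqsL]

-- A's incremental full-path step equals B's _join step (String.empty_append)
theorem joinStep_eq :
    (fun (full part : String) => if full = "" then full ++ part else full ++ "/" ++ part)
      = (fun (full part : String) => if full = "" then part else full ++ "/" ++ part) := by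
  funext a x
  split_ifs with h
  · rw [h, String.empty_append]
  · rfl

-- membership in B's list of all (proper) prefix tuples
theorem mem_prefList (splits : List (List String)) (s : List String) :
    (s ∈ splits.flatMap (fun p => (PySem.List.pyRange 1 ((p.length : Int) + 1) 1).map (fun i => p.take i.toNat))
      ↔ ∃ q ∈ splits, s ≠ [] ∧ s <+: q) := by
  simp only [List.mem_flatMap, List.mem_map]
  constructor
  · rintro ⟨q, hq, i, hi, rfl⟩
    rw [PySem.List.mem_pyRange_one] at hi
    refine ⟨q, hq, ?_, List.take_prefix _ _⟩
    rw [Ne, List.take_eq_nil_iff]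
    rintro (h0 | rfl)
    · omega
    · simp at hi; omega
  · rintro ⟨q, hq, hne, hpre⟩
    have h1 : 0 < s.length := List.length_pos_iff.mpr hne
    have h2 : s.length ≤ q.length := List.IsPrefix.length_le hpre
    refine ⟨q, hq, (s.length : Int), ?_, ?_⟩
    · rw [PySem.List.mem_pyRange_one]; constructor <;> [omega; (push_cast; omega)]
    · rw [Int.toNat_natCast]; exact (List.prefix_iff_eq_take.mp hpre).symm

theorem mem_properPrefList (splits : List (List String)) (s : List String) :
    (s ∈ splits.flatMap (fun p => (PySem.List.pyRange 1 (p.length : Int) 1).map (fun i => p.take i.toNat))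
      ↔ ∃ q ∈ splits, s ≠ [] ∧ s <+: q ∧ s.length < q.length) := by
  simp only [List.mem_flatMap, List.mem_map]
  constructor
  · rintro ⟨q, hq, i, hi, rfl⟩
    rw [PySem.List.mem_pyRange_one] at hi
    have hlen : (q.take i.toNat).length = i.toNat := by
      rw [List.length_take]; omega
    refine ⟨q, hq, ?_, List.take_prefix _ _, by omega⟩
    rw [Ne, List.take_eq_nil_iff]
    rintro (h0 | rfl)
    · omega
    · simp at hi; omega
  · rintro ⟨q, hq, hne, hpre, hlt⟩
    have h1 : 0 < s.length := List.length_pos_iff.mpr hne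
    refine ⟨q, hq, (s.length : Int), ?_, ?_⟩
    · rw [PySem.List.mem_pyRange_one]; constructor <;> [omega; (push_cast; omega)]
    · rw [Int.toNat_natCast]; exact (List.prefix_iff_eq_take.mp hpre).symm

-- proper nonempty prefixes are exactly the paths with an extension in the trie
theorem proper_iff_ext (splits : List (List String)) (s : List String) (hne : s ≠ []) :
    ((∃ q ∈ splits, s ≠ [] ∧ s <+: q ∧ s.length < q.length) ↔ ∃ k, ∃ q ∈ splits, s ++ [k] ≠ [] ∧ s ++ [k] <+: q) := by
  constructor
  · rintro ⟨q, hq, _, hpre, hlt⟩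
    refine ⟨q[s.length], q, hq, by simp, ?_⟩
    have hst := List.prefix_iff_eq_take.mp hpre
    have hdrop : q[s.length] :: q.drop (s.length + 1) = q.drop s.length := List.getElem_cons_drop hlt
    refine ⟨q.drop (s.length + 1), ?_⟩
    rw [List.append_assoc, List.singleton_append, hdrop]
    conv_rhs => rw [← List.take_append_drop s.length q]
    rw [← hst]
  · rintro ⟨k, q, hq, _, hpre⟩
    have h1 : s <+: q := List.IsPrefix.trans (List.prefix_append s [k]) hpre
    have h2 := List.IsPrefix.length_le hpre
    simp only [List.length_append, List.length_cons, List.length_nil] at h2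
    exact ⟨q, hq, hne, h1, by omega⟩

-- the instance bridge for sorting lists of tuples (the order is the same; instances are defeq)
theorem sortedLS_instEq (xs : List (List String)) :
    PySem.List.sorted xs (fun t => t) false
      = @PySem.List.sorted (List String) (List String) List.instLinearOrder.toLT LinearOrder.toDecidableLT xs (fun t => t) false := by
  congr 1

-- the heart: A's trie pipeline equals B's sorted-prefix pipeline, for any column values
theorem core_eq (sep : String) (paths : List String) (mapvals : PySem.Dict String (List String)) (other : Int) :
    ((flatten_tree (build_tree paths sep) 0 "").foldl
      (fun new q => new ++ [(pyStrMul "  " q.2.2.1 ++ q.2.1) ::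
        (if q.2.2.2 && (PySem.Dict.get? mapvals q.1).isSome
         then (PySem.Dict.get? mapvals q.1).getD []
         else PySem.List.pyRepeat [""] other)]) [])
    = (PySem.List.sorted (PySem.Set.ofList ((paths.map (fun p => (PySem.Str.split? p sep).getD [])).flatMap
          (fun p => (PySem.List.pyRange 1 ((p.length : Int) + 1) 1).map (fun i => p.take i.toNat)))) (fun t => t) false).map
        (fun t =>
          (pyStrMul "  " ((t.length : Int) - 1) ++ PySem.List.pyGetD t (-1) "") ::
          (if !(PySem.Set.contains (PySem.Set.ofList ((paths.map (fun p => (PySem.Str.split? p sep).getD [])).flatMap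
                  (fun p => (PySem.List.pyRange 1 (p.length : Int) 1).map (fun i => p.take i.toNat)))) t)
              && (PySem.Dict.get? mapvals (joinParts t)).isSome
           then (PySem.Dict.get? mapvals (joinParts t)).getD []
           else PySem.List.pyRepeat [""] other)) := by
  set splits := paths.map (fun p => (PySem.Str.split? p sep).getD []) with hsplits
  set tree := build_tree paths sep with htree
  have hwf : wfT tree = true := wf_build paths sep
  have hmem : ∀ s, s ∈ seqsT tree ↔ ∃ q ∈ splits, s ≠ [] ∧ s <+: q := by
    intro s
    rw [htree, seqs_build paths sep s, hsplits]
    simp only [List.mem_map]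
    constructor
    · rintro ⟨p, hp, h1, h2⟩; exact ⟨_, ⟨p, hp, rfl⟩, h1, h2⟩
    · rintro ⟨q, ⟨p, hp, rfl⟩, h1, h2⟩; exact ⟨p, hp, h1, h2⟩
  have hpw : ((slT tree).map (·.1)).Pairwise (· < ·) := slT_pairwise (sizeT tree) tree le_rfl hwf
  have hperm : ((slT tree).map (·.1)).Perm (seqsT tree) := slT_perm (sizeT tree) tree le_rfl hwf
  have hnodupA : ((slT tree).map (·.1)).Nodup := hpw.imp ne_of_lt
  have hnodupSeqs : (seqsT tree).Nodup := hperm.nodup_iff.mp hnodupA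
  -- the sorted node set is exactly the slT path list
  have hsorted : PySem.List.sorted (PySem.Set.ofList (splits.flatMap
        (fun p => (PySem.List.pyRange 1 ((p.length : Int) + 1) 1).map (fun i => p.take i.toNat)))) (fun t => t) false
      = (slT tree).map (·.1) := by
    rw [sortedLS_instEq]
    apply PySem.List.sorted_eq_of_perm_of_pairwise_lt
    · refine hperm.trans ?_
      rw [List.perm_ext_iff_of_nodup hnodupSeqs (PySem.Set.nodup_ofList _)]
      intro s
      rw [PySem.Set.mem_ofList, hmem s, mem_prefList]
    · exact hpw
  -- A's loop is a map
  rw [PySem.List.foldl_append_singleton_eq_map, List.nil_append]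
  rw [flatten_eq_slT (sizeT tree) tree le_rfl 0 "", List.map_map, hsorted, List.map_map]
  apply List.map_congr_left
  intro q hq
  have hqne : q.1 ≠ [] := slT_ne_nil (sizeT tree) tree le_rfl q hq
  have hflag := slT_flag (sizeT tree) tree le_rfl hwf q hq
  -- the leaf flag is the complement of the proper-prefix-set test
  have hbool : q.2 = !(PySem.Set.contains (PySem.Set.ofList (splits.flatMap
      (fun p => (PySem.List.pyRange 1 (p.length : Int) 1).map (fun i => p.take i.toNat)))) q.1) := by
    have hcont : PySem.Set.contains (PySem.Set.ofList (splits.flatMap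
        (fun p => (PySem.List.pyRange 1 (p.length : Int) 1).map (fun i => p.take i.toNat)))) q.1 = true
        ↔ ∃ k, q.1 ++ [k] ∈ seqsT tree := by
      rw [PySem.Set.contains_iff, PySem.Set.mem_ofList, mem_properPrefList,
        proper_iff_ext splits q.1 hqne]
      constructor
      · rintro ⟨k, q', hq', h1, h2⟩; exact ⟨k, (hmem _).mpr ⟨q', hq', h1, h2⟩⟩
      · rintro ⟨k, hk⟩
        obtain ⟨q', hq', h1, h2⟩ := (hmem _).mp hk
        exact ⟨k, q', hq', h1, h2⟩
    cases hv : PySem.Set.contains (PySem.Set.ofList (splits.flatMap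
        (fun p => (PySem.List.pyRange 1 (p.length : Int) 1).map (fun i => p.take i.toNat)))) q.1 with
    | true =>
        obtain ⟨k, hk⟩ := hcont.mp hv
        simp only [Bool.not_true]
        by_contra hq2
        have : q.2 = true := by revert hq2; cases q.2 <;> simp
        exact (hflag.mp this k) hk
    | false =>
        simp only [Bool.not_false]
        rw [hflag]
        intro k hk
        exact absurd (hcont.mpr ⟨k, hk⟩) (by rw [hv]; simp)
  -- componentwise equality of the emitted row
  simp only [Function.comp, decoFn]
  congr 1
  · congr 2
    · omega
    · rw [PySem.List.pyGetD_neg_one q.1 "" hqne]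
      simp [List.getLastD_eq_getLast?, List.getLast?_eq_getLast_of_ne_nil hqne]
  · rw [joinParts, joinStep_eq, hbool]

-- the header scan: both ports agree at every index
theorem go_eq : ∀ (hs : List (List (String × List (String × String)))) (idx : Int) (rows : List (List String)),
    apply_hierarchy_go hs idx rows = apply_hierarchy_alt_go hs idx rows := by
  intro hs
  induction hs with
  | nil => intro idx rows; rfl
  | cons h t ih =>
      intro idx rows
      rw [apply_hierarchy_go, apply_hierarchy_alt_go]
      split
      · simp only []
        generalize PySem.Dict.getD (PySem.Dict.mk ((PySem.Dict.get? (PySem.Dict.mk h) "hierarchy").getD [])) "sep" "/" = sep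
        have hcomp : (fun r => (PySem.Str.split? (PySem.List.pyGetD r idx "") sep).getD [])
            = (fun p => (PySem.Str.split? p sep).getD []) ∘ (fun r => PySem.List.pyGetD r idx "") := rfl
        rw [hcomp, ← List.map_map]
        exact core_eq sep (rows.map (fun r => PySem.List.pyGetD r idx "")) _ _
      · exact ih (idx + 1) rows

-- ===== VERDICT (by name: the statement is the Claim_ definition above) =====
theorem apply_hierarchy_spec : Claim_equal_apply_hierarchy := by
  intro headers rows _ _
  show apply_hierarchy headers rows = apply_hierarchy_alt headers rows
  rw [apply_hierarchy, apply_hierarchy_alt]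
  exact go_eq headers 0 rows
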